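-- pv_equiv track=rewrite | github.com/pypi-data/pypi-mirror-115 | packages/dependency-miner-pm4py/dependency_miner_pm4py-1.0.1-py3-none-any.whl/dependency_miner/ltminer.py | soundness_at_XOR_tree
-- ===== SOURCE A (Python) =====
-- def soundness_at_XOR_tree(rules):
--     """
--     Preserving Soundness between XOR blocks based on the highest lift value.
--
--     Parameters:
--         rules (dict) : Discovered rules and their XOR blocks
--
--     Return:
--         Sound XOR blocks pair (dict) : Sound XOR block pairs to be used for generating sound Precise net
--
--     """
--     sound_xor_rule = {}
--     keys_to_be_removed = []
--     key_copy = tuple(rules.keys())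
--     for i in range(len(rules.keys())):
--         if len(rules.keys()) != 0:
--             sound_xor_rule[next(iter(rules))] = rules[next(iter(rules))]
--             for k,v in rules.items():
--                 if k[0] == list(sound_xor_rule.items())[len(sound_xor_rule)-1][0][0]:
--                     keys_to_be_removed.append(k)
--                 elif k[1] == list(sound_xor_rule.items())[len(sound_xor_rule)-1][0][1]:
--                     keys_to_be_removed.append(k)
--             for k in keys_to_be_removed:
--                 if k in rules.keys():
--                     del rules[k]
--     return sound_xor_rule
-- ===== SOURCE B (Python) =====
-- def soundness_at_XOR_tree(rules):
--     """Single pass: keep a rule iff neither coordinate of its key was already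
--     taken by an earlier kept rule; O(n) with two blocked-coordinate sets."""
--     sound_xor_rule = {}
--     blocked_first = set()
--     blocked_second = set()
--     for k, v in list(rules.items()):
--         if k[0] not in blocked_first and k[1] not in blocked_second:
--             sound_xor_rule[k] = v
--             blocked_first.add(k[0])
--             blocked_second.add(k[1])
--     rules.clear()  # A also leaves the input dict empty
--     return sound_xor_rule
-- ===== Notes on version B (the rewrite author's own statement) =====
-- stated objective: faster
-- what changed: A repeatedly takes the first remaining dict key and rescans/deletes the whole dict against an ever-growing removal list; B makes a single pass keeping a rule iff neither coordinate of its key is in one of two blocked-coordinate sets. Pre_ only rules out duplicate key pairs in the Lean association list, which no Python dict argument can represent.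
import Mathlib
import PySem

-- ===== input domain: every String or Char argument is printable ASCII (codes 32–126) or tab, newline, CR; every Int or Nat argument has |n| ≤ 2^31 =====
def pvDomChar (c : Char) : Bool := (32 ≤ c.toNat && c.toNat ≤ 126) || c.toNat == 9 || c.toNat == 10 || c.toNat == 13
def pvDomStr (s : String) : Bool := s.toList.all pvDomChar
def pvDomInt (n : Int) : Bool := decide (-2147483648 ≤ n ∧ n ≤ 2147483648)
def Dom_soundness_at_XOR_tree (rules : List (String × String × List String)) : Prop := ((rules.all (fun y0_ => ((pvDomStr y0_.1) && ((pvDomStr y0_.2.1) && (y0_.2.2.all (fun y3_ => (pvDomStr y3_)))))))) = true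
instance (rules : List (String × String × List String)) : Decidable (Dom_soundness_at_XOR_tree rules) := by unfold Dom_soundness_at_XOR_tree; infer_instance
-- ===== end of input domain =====

-- B replaces A's O(n^3) repeated rescan-and-delete of the dict by one pass with two
-- blocked-coordinate sets (kept return value identical; NOTE: Python A empties the input
-- dict in place, and Python B reproduces that side effect with rules.clear()).

-- ===== PORT A =====
-- The Python A receives `rules` as a dict keyed by the pair (k[0], k[1]); under the type
-- convention the Lean argument is the flat association list, so the port first rebuilds the
-- dict with PySem.Dict.ofList and flattens the resulting dict back to triples at the end.

-- one iteration state: the mutable dict `rules`, the dict `sound_xor_rule`, the ever-growing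
-- list `keys_to_be_removed`; the outer `for i in range(len(rules.keys()))` is the fuel.
def aLoop (fuel : Nat) (rules : PySem.Dict (String × String) (List String))
    (sound : PySem.Dict (String × String) (List String))
    (ktbr : List (String × String)) : PySem.Dict (String × String) (List String) :=
  match fuel with
  | 0 => sound
  | f + 1 =>
    match rules.items with
    | [] => aLoop f rules sound ktbr          -- `if len(rules.keys()) != 0` fails: body skipped
    | (k0, v0) :: _ =>
      -- sound_xor_rule[next(iter(rules))] = rules[next(iter(rules))]
      -- (next(iter(rules)) is the first key; rules[first key] is the first value, since a
      -- dict's keys are unique)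
      let sound' := sound.insert k0 v0
      -- list(sound_xor_rule.items())[len(sound_xor_rule)-1][0]  (sound' is nonempty, so the
      -- default of getLast? is never used)
      let last := (sound'.items.getLast?.getD (("", ""), [])).1
      -- for k,v in rules.items(): if k[0] == last[0]: append(k) elif k[1] == last[1]: append(k)
      let ktbr' := ktbr ++ (rules.items.filter (fun p =>
          if p.1.1 == last.1 then true else if p.1.2 == last.2 then true else false)).map (·.1)
      -- for k in keys_to_be_removed: if k in rules.keys(): del rules[k]
      let rules' := ktbr'.foldl (fun r k => if r.contains k then r.erase k else r) rules
      aLoop f rules' sound' ktbr'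

def soundness_at_XOR_tree (rules : List (String × String × List String)) : List (String × String × List String) :=
  let d := PySem.Dict.ofList (rules.map (fun e => ((e.1, e.2.1), e.2.2)))
  (aLoop d.size d PySem.Dict.empty []).items.map (fun p => (p.1.1, p.1.2, p.2))

-- ===== PORT B =====
-- for k, v in list(rules.items()): if k[0] not in blocked_first and k[1] not in blocked_second:
--   keep it and block both coordinates.  Every kept key is fresh (its first coordinate was
-- unblocked), so B's result dict is exactly the list of kept triples in order.
def bGo (l : List (String × String × List String)) (blockedF blockedS : PySem.Set String) :
    List (String × String × List String) :=
  match l with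
  | [] => []
  | (a, b, v) :: rest =>
    if ¬ blockedF.contains a ∧ ¬ blockedS.contains b then
      (a, b, v) :: bGo rest (blockedF.add a) (blockedS.add b)
    else
      bGo rest blockedF blockedS

def soundness_at_XOR_tree_alt (rules : List (String × String × List String)) : List (String × String × List String) :=
  bGo rules PySem.Set.empty PySem.Set.empty

-- ===== PRECONDITION & SPEC =====
-- Pre_ excludes lists whose key pairs (first, second) repeat: the Python argument is a dict,
-- which cannot hold duplicate keys, so the association-list/dict correspondence is ambiguous there.
def Pre_soundness_at_XOR_tree (rules : List (String × String × List String)) : Prop :=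
  (rules.map (fun e => (e.1, e.2.1))).Nodup
instance (rules : List (String × String × List String)) : Decidable (Pre_soundness_at_XOR_tree rules) := by
  unfold Pre_soundness_at_XOR_tree; infer_instance
def pvWitness_soundness_at_XOR_tree : (List (String × String × List String)) :=
  [("a", "b", ["x"]), ("a", "c", []), ("d", "b", ["y", "z"]), ("e", "f", [])]

def Spec_soundness_at_XOR_tree (rules : List (String × String × List String)) (out : List (String × String × List String)) : Prop := out = soundness_at_XOR_tree_alt rules
instance (rules : List (String × String × List String)) (out : List (String × String × List String)) : Decidable (Spec_soundness_at_XOR_tree rules out) := by unfold Spec_soundness_at_XOR_tree; infer_instance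

-- ===== CLAIM (what is proved, stated in full; the proofs are below) =====
def Claim_equal_soundness_at_XOR_tree : Prop := ∀ (rules : List (String × String × List String)), Dom_soundness_at_XOR_tree rules → Pre_soundness_at_XOR_tree rules → Spec_soundness_at_XOR_tree rules (soundness_at_XOR_tree rules)

-- ===== LEMMAS AND PROOFS =====

-- the common functional core: keep the head, drop everything sharing a coordinate with it
def greedyP (l : List ((String × String) × List String)) : List ((String × String) × List String) :=
  match l with
  | [] => []
  | (k, v) :: rest =>
      (k, v) :: greedyP (rest.filter (fun p => !(p.1.1 == k.1) && !(p.1.2 == k.2)))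
termination_by l.length
decreasing_by
  simp
  exact le_trans (List.length_filter_le _ _) (by simp)

theorem greedyP_nil : greedyP [] = [] := by rw [greedyP]

theorem greedyP_cons (k : String × String) (v : List String)
    (rest : List ((String × String) × List String)) :
    greedyP ((k, v) :: rest)
      = (k, v) :: greedyP (rest.filter (fun p => !(p.1.1 == k.1) && !(p.1.2 == k.2))) := by
  rw [greedyP]

theorem pred_not (k0 : String × String) (p : (String × String) × List String) :
    (!(if p.1.1 == k0.1 then true else if p.1.2 == k0.2 then true else false))
      = (!(p.1.1 == k0.1) && !(p.1.2 == k0.2)) := by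
  rcases Bool.eq_false_or_eq_true (p.1.1 == k0.1) with h | h <;>
    rcases Bool.eq_false_or_eq_true (p.1.2 == k0.2) with h' | h' <;>
      simp [h, h']

theorem key_inj {l : List ((String × String) × List String)}
    (hnd : (l.map (·.1)).Nodup) {p q : (String × String) × List String}
    (hp : p ∈ l) (hq : q ∈ l) (h : p.1 = q.1) : p = q :=
  List.inj_on_of_nodup_map hnd hp hq h

-- the deletion loop `for k in ks: if k in rules: del rules[k]` is a single filter
theorem foldl_erase_items (ks : List (String × String))
    (r : PySem.Dict (String × String) (List String)) :
    (ks.foldl (fun r k => if r.contains k then r.erase k else r) r).items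
      = r.items.filter (fun p => !ks.contains p.1) := by
  induction ks generalizing r with
  | nil => simp
  | cons k ks ih =>
    have hstep : (if r.contains k then r.erase k else r).items
        = r.items.filter (fun p => !(p.1 == k)) := by
      rcases Bool.eq_false_or_eq_true (r.contains k) with h | h
      · simp [h, PySem.Dict.erase]
      · have h' : ∀ p ∈ r.items, (!(p.1 == k)) = true := by
          intro p hp
          simp only [PySem.Dict.contains, List.any_eq_false] at h
          simpa using h p hp
        simp [h, List.filter_eq_self.mpr h']
    rw [List.foldl_cons, ih, hstep, List.filter_filter]
    apply List.filter_congr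
    intro p _
    rw [List.contains_cons, Bool.not_or, Bool.and_comm]

-- main invariant of A's outer loop
theorem aLoop_items (fuel : Nat) : ∀ (l : List ((String × String) × List String))
    (d : PySem.Dict (String × String) (List String)) (ktbr : List (String × String)),
    l.length ≤ fuel →
    (l.map (·.1)).Nodup →
    (∀ k ∈ d.keys, k ∉ l.map (·.1)) →
    (∀ k ∈ ktbr, k ∉ l.map (·.1)) →
    (aLoop fuel ⟨l⟩ d ktbr).items = d.items ++ greedyP l := by
  induction fuel with
  | zero =>
    intro l d ktbr hlen _ _ _
    have : l = [] := List.eq_nil_of_length_eq_zero (Nat.le_zero.mp hlen)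
    subst this
    simp [aLoop, greedyP_nil]
  | succ f ih =>
    intro l d ktbr hlen hnd hd hktbr
    match l with
    | [] =>
      simpa [aLoop] using ih [] d ktbr (by simp) (by simp) (by simp) (by simp)
    | (k0, v0) :: rest =>
      have hk0new : d.contains k0 = false := by
        rcases Bool.eq_false_or_eq_true (d.contains k0) with h | h
        · exfalso
          simp only [PySem.Dict.contains, List.any_eq_true, beq_iff_eq] at h
          obtain ⟨p, hp, hpk⟩ := h
          exact hd k0 (by simpa [PySem.Dict.keys] using List.mem_map.mpr ⟨p, hp, hpk⟩) (by simp)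
        · exact h
      have hins : (d.insert k0 v0).items = d.items ++ [(k0, v0)] :=
        PySem.Dict.items_insert_of_not_contains d v0 hk0new
      show (aLoop (f + 1) ⟨(k0, v0) :: rest⟩ d ktbr).items = _
      rw [aLoop]
      simp only [hins, List.getLast?_concat, Option.getD_some]
      set pred : (String × String) × List String → Bool :=
        (fun p => if p.1.1 == k0.1 then true else if p.1.2 == k0.2 then true else false) with hpred
      set l := (k0, v0) :: rest with hl
      set matched := (l.filter pred).map (·.1) with hmatched
      set ktbr' := ktbr ++ matched with hktbr'
      have hmem : ∀ p ∈ l, (p.1 ∈ matched ↔ pred p = true) := by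
        intro p hp
        constructor
        · intro hin
          rw [hmatched] at hin
          obtain ⟨q, hq, hqk⟩ := List.mem_map.mp hin
          have hq' := List.mem_of_mem_filter hq
          have : q = p := key_inj hnd hq' hp hqk
          subst this
          exact List.of_mem_filter hq
        · intro hpp
          exact hmatched ▸ List.mem_map.mpr ⟨p, List.mem_filter.mpr ⟨hp, hpp⟩, rfl⟩
      have hrules' : ((ktbr'.foldl (fun r k => if r.contains k then r.erase k else r)
            (⟨l⟩ : PySem.Dict (String × String) (List String))).items)
          = rest.filter (fun p => !(p.1.1 == k0.1) && !(p.1.2 == k0.2)) := by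
        rw [foldl_erase_items]
        show l.filter _ = _
        have hpt : l.filter (fun p => !ktbr'.contains p.1)
            = l.filter (fun p => !pred p) := by
          apply List.filter_congr
          intro p hp
          have h1 : p.1 ∉ ktbr := fun h => hktbr p.1 h (List.mem_map.mpr ⟨p, hp, rfl⟩)
          have h2 := hmem p hp
          congr 1
          rcases Bool.eq_false_or_eq_true (pred p) with h | h
          · have hyes : p.1 ∈ ktbr' := by
              rw [hktbr', List.mem_append]
              exact Or.inr (h2.mpr h)
            rw [h]
            simp [List.contains_eq_mem, hyes]
          · have hnot : p.1 ∉ ktbr' := by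
              rw [hktbr', List.mem_append]
              rintro (hk | hk)
              · exact h1 hk
              · rw [h2.mp hk] at h; simp at h
            rw [h]
            simp [List.contains_eq_mem, hnot]
        rw [hpt, hl]
        rw [List.filter_cons_of_neg (by simp [hpred])]
        apply List.filter_congr
        intro p _
        rw [hpred]
        exact pred_not k0 p
      have hrd : (ktbr'.foldl (fun r k => if r.contains k then r.erase k else r)
            (⟨l⟩ : PySem.Dict (String × String) (List String)))
          = (⟨rest.filter (fun p => !(p.1.1 == k0.1) && !(p.1.2 == k0.2))⟩ :
              PySem.Dict (String × String) (List String)) :=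
        PySem.Dict.ext hrules'
      rw [hrd]
      set l' := rest.filter (fun p => !(p.1.1 == k0.1) && !(p.1.2 == k0.2)) with hl'
      have hsub : ∀ p ∈ l', p ∈ rest := fun p hp => List.mem_of_mem_filter hp
      have hndc : (k0 :: rest.map (·.1)).Nodup := by
        have h := hnd; rw [hl] at h; simpa using h
      have hndrest : (rest.map (·.1)).Nodup := (List.nodup_cons.mp hndc).2
      have hndl' : (l'.map (·.1)).Nodup :=
        hndrest.sublist (List.Sublist.map _ List.filter_sublist)
      have hk0notrest : k0 ∉ rest.map (·.1) := (List.nodup_cons.mp hndc).1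
      have hnotl' : ∀ k, k ∉ rest.map (·.1) → k ∉ l'.map (·.1) := by
        intro k hk hk'
        obtain ⟨p, hp, hpk⟩ := List.mem_map.mp hk'
        exact hk (List.mem_map.mpr ⟨p, hsub p hp, hpk⟩)
      have ihres := ih l' (d.insert k0 v0) ktbr'
        (le_trans (List.length_filter_le _ _) (by simpa using Nat.le_of_succ_le_succ hlen))
        hndl'
        (by
          intro k hk
          have hk' : k ∈ d.keys ∨ k = k0 := by
            simp only [PySem.Dict.keys, hins, List.map_append, List.mem_append, List.map_cons,
              List.map_nil, List.mem_cons, List.not_mem_nil, or_false] at hk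
            exact hk
          rcases hk' with hk2 | hk2
          · refine hnotl' k (fun h => hd k hk2 ?_)
            rw [hl, List.map_cons]
            exact List.mem_cons_of_mem _ h
          · subst hk2
            exact hnotl' _ hk0notrest)
        (by
          intro k hk hkl'
          obtain ⟨p, hp, hpk⟩ := List.mem_map.mp hkl'
          have hprest := hsub p hp
          have hpl : p ∈ l := by rw [hl]; exact List.mem_cons_of_mem _ hprest
          rw [hktbr', List.mem_append] at hk
          rcases hk with hk | hk
          · exact hktbr k hk (by rw [hl]; exact List.mem_map.mpr ⟨p, hpl, hpk⟩)
          · have hpt : pred p = true := (hmem p hpl).mp (hpk ▸ hk)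
            have hfail := List.of_mem_filter hp
            rcases Bool.eq_false_or_eq_true (p.1.1 == k0.1) with h | h
            · simp [h] at hfail
            · simp [hpred] at hpt
              simp at hfail
              exact hpt.elim hfail.1 hfail.2)
      rw [ihres, hins]
      have hgl : greedyP l = (k0, v0) :: greedyP l' := by
        rw [hl, greedyP_cons, ← hl']
      rw [hgl]
      simp

-- B's pass with blocked sets computes greedyP of the unblocked entries
theorem bGo_eq (l : List (String × String × List String)) :
    ∀ (bf bs : PySem.Set String),
    bGo l bf bs
      = (greedyP ((l.map (fun e => ((e.1, e.2.1), e.2.2))).filter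
          (fun p => !bf.contains p.1.1 && !bs.contains p.1.2))).map
            (fun p => (p.1.1, p.1.2, p.2)) := by
  induction l with
  | nil => intro bf bs; simp [bGo, greedyP_nil]
  | cons e rest ih =>
    intro bf bs
    obtain ⟨a, b, v⟩ := e
    by_cases hblk : ¬ bf.contains a ∧ ¬ bs.contains b
    · rw [bGo]
      simp only [if_pos hblk]
      rw [List.map_cons]
      dsimp only
      have hkeep : (!bf.contains a && !bs.contains b) = true := by
        simp only [Bool.and_eq_true, Bool.not_eq_true']
        exact ⟨by simpa using hblk.1, by simpa using hblk.2⟩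
      simp only [List.filter_cons, hkeep, reduceIte]
      rw [greedyP_cons, List.filter_filter, List.map_cons]
      congr 1
      rw [ih (bf.add a) (bs.add b)]
      congr 2
      apply List.filter_congr
      intro p _
      have h1 : (bf.add a).contains p.1.1 = (bf.contains p.1.1 || p.1.1 == a) := by
        simp [List.contains_eq_mem, PySem.Set.mem_add, Bool.beq_eq_decide_eq]
      have h2 : (bs.add b).contains p.1.2 = (bs.contains p.1.2 || p.1.2 == b) := by
        simp [List.contains_eq_mem, PySem.Set.mem_add, Bool.beq_eq_decide_eq]
      rw [h1, h2]
      rcases Bool.eq_false_or_eq_true (bf.contains p.1.1) with c1 | c1 <;>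
        rcases Bool.eq_false_or_eq_true (bs.contains p.1.2) with c2 | c2 <;>
          rcases Bool.eq_false_or_eq_true (p.1.1 == a) with c3 | c3 <;>
            rcases Bool.eq_false_or_eq_true (p.1.2 == b) with c4 | c4 <;>
              simp_all
    · rw [bGo]
      simp only [if_neg hblk]
      have hdrop : (!bf.contains a && !bs.contains b) = false := by
        rcases Bool.eq_false_or_eq_true (bf.contains a) with h | h <;>
          rcases Bool.eq_false_or_eq_true (bs.contains b) with h2 | h2 <;>
            simp_all
      rw [List.map_cons]
      dsimp only
      simp only [List.filter_cons, hdrop, Bool.false_eq_true, if_false]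
      exact ih bf bs

-- ===== VERDICT (by name: the statement is the Claim_ definition above) =====
theorem soundness_at_XOR_tree_spec : Claim_equal_soundness_at_XOR_tree := by
  intro rules _ hpre
  unfold Spec_soundness_at_XOR_tree
  simp only [soundness_at_XOR_tree, soundness_at_XOR_tree_alt]
  set l := rules.map (fun e => ((e.1, e.2.1), e.2.2)) with hldef
  have hnd : (l.map (·.1)).Nodup := by
    rw [hldef, List.map_map]
    exact hpre
  have hofl : PySem.Dict.ofList l = (⟨l⟩ : PySem.Dict (String × String) (List String)) := by
    unfold PySem.Dict.ofList PySem.Dict.update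
    apply PySem.Dict.ext
    rw [show (fun (acc : PySem.Dict (String × String) (List String)) (p : (String × String) × List String) => acc.insert p.1 p.2)
          = (fun acc p => acc.insert ((·.1) p) ((·.2) p)) from rfl]
    rw [PySem.Dict.items_foldl_insert_fresh l (·.1) (·.2) PySem.Dict.empty
      (by intro a _; rfl) hnd]
    simp [PySem.Dict.empty]
  rw [hofl]
  rw [aLoop_items _ l PySem.Dict.empty []
    (by simp [PySem.Dict.size]) hnd (by simp [PySem.Dict.empty, PySem.Dict.keys]) (by simp)]
  rw [bGo_eq rules PySem.Set.empty PySem.Set.empty]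
  simp [PySem.Dict.empty, PySem.Set.empty, ← hldef]
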